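-- pv_equiv track=rewrite | github.com/shuttlego/shuttlego.github.io | scripts/fill_stop_geo.py | _find_route_stations
-- ===== SOURCE A (Python) =====
-- def _find_route_stations(
--     route_name: str,
--     sequence: int,
--     route_info_list: list[tuple[str, list[str]]],
-- ) -> tuple[str, str]:
--     """노선명·sequence에 맞는 직전/직후 정류장명을 geo_route_info 기준으로 반환. 없으면 ('', '')."""
--     # 1) 노선명 완전 일치 2) 노선명이 route_info 노선명을 포함 3) route_info 노선명이 노선명을 포함
--     candidates: list[tuple[str, list[str]]] = []
--     for info_name, stations in route_info_list:
--         if info_name == route_name: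
--             candidates.insert(0, (info_name, stations))
--             break
--     if not candidates:
--         for info_name, stations in route_info_list:
--             if route_name in info_name or info_name in route_name:
--                 candidates.append((info_name, stations))
--     if not candidates:
--         return ("", "")
--     _, stations = candidates[0]
--     # sequence는 1-based, 인덱스는 0-based
--     idx = sequence - 1
--     if idx < 0 or idx >= len(stations):
--         return ("", "")
--     prev_name = stations[idx - 1] if idx >= 1 else ""
--     next_name = stations[idx + 1] if idx + 1 < len(stations) else ""
--     return (prev_name, next_name)
-- ===== SOURCE B (Python) =====
-- def _find_route_stations(
--     route_name: str,
--     sequence: int,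
--     route_info_list: list[tuple[str, list[str]]],
-- ) -> tuple[str, str]:
--     # Rank every fuzzy-matching entry (0 = exact name, 1 = substring match) and
--     # select the minimum by (rank, position); an exact match is a substring
--     # match too, so one comprehension collects all candidates at once.
--     ranked = [((0 if name == route_name else 1, pos), stations)
--               for pos, (name, stations) in enumerate(route_info_list)
--               if route_name in name or name in route_name]
--     if not ranked:
--         return ("", "")
--     stations = min(ranked, key=lambda item: item[0])[1]
--     idx = sequence - 1
--     if idx < 0 or idx >= len(stations):
--         return ("", "")
--     prev_name = stations[idx - 1] if idx >= 1 else ""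
--     next_name = stations[idx + 1] if idx + 1 < len(stations) else ""
--     return (prev_name, next_name)
-- ===== Notes on version B (the rewrite author's own statement) =====
-- stated objective: alternative
-- what changed: Instead of A's two staged scans with an early break, B builds one ranked candidate list in a single comprehension (rank 0 for exact name, 1 for substring match) and selects the best candidate with min by (rank, position).
import Mathlib
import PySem

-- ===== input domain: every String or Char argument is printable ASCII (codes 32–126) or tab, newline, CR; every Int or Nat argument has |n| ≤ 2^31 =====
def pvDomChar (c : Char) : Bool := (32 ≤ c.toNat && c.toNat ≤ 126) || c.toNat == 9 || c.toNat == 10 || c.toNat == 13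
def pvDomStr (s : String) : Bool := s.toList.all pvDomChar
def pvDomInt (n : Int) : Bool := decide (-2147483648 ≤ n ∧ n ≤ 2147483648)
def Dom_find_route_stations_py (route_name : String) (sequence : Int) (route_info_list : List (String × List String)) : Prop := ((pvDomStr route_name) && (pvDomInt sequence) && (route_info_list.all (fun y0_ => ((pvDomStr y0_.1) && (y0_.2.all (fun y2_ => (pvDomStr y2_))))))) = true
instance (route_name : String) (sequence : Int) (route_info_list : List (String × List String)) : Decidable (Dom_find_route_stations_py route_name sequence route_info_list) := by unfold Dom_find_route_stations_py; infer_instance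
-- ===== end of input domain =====

-- B replaces A's two staged scans (break on exact match, else collect substring matches) with
-- one ranked candidate list selected by min over (rank, position) (objective: alternative).

-- ===== PORT A =====
-- first loop of A: scan for an exact name match, break at the first one (candidates after loop 1)
def pvA_loop1 (route_name : String) : List (String × List String) → List (String × List String)
  | [] => []
  | (info_name, stations) :: rest =>
    if info_name = route_name then [(info_name, stations)]
    else pvA_loop1 route_name rest

-- second loop of A: collect all substring matches in order (candidates after loop 2)
def pvA_loop2 (route_name : String) : List (String × List String) → List (String × List String)
  | [] => []
  | (info_name, stations) :: rest =>
    if PySem.Str.isIn route_name info_name || PySem.Str.isIn info_name route_name then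
      (info_name, stations) :: pvA_loop2 route_name rest
    else pvA_loop2 route_name rest

def find_route_stations_py (route_name : String) (sequence : Int) (route_info_list : List (String × List String)) : String × String :=
  let c1 := pvA_loop1 route_name route_info_list
  let candidates := if c1 = [] then pvA_loop2 route_name route_info_list else c1
  match candidates with
  | [] => ("", "")
  | (_, stations) :: _ =>
    let idx := sequence - 1
    if idx < 0 || (stations.length : Int) ≤ idx then ("", "")
    else
      let prev_name := if 1 ≤ idx then PySem.List.pyGetD stations (idx - 1) "" else ""
      let next_name := if idx + 1 < (stations.length : Int) then PySem.List.pyGetD stations (idx + 1) "" else ""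
      (prev_name, next_name)

-- ===== PORT B =====
-- Source B's comprehension over enumerate(route_info_list): the running position is the Nat parameter
def pvB_ranked (route_name : String) (pos : Nat) : List (String × List String) → List ((Nat × Nat) × List String)
  | [] => []
  | (name, stations) :: rest =>
    if PySem.Str.isIn route_name name || PySem.Str.isIn name route_name then
      ((if name = route_name then 0 else 1, pos), stations) :: pvB_ranked route_name (pos + 1) rest
    else pvB_ranked route_name (pos + 1) rest

-- Python tuple '<' on the (rank, position) keys (positions are distinct, so the key decides)
def pvKeyLt (a b : Nat × Nat) : Bool := a.1 < b.1 || (a.1 = b.1 && decide (a.2 < b.2))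

-- min(ranked, key=item[0]): fold keeping the first element with minimal key
def pvB_min (best : (Nat × Nat) × List String) : List ((Nat × Nat) × List String) → (Nat × Nat) × List String
  | [] => best
  | x :: rest => pvB_min (if pvKeyLt x.1 best.1 then x else best) rest

def find_route_stations_py_alt (route_name : String) (sequence : Int) (route_info_list : List (String × List String)) : String × String :=
  match pvB_ranked route_name 0 route_info_list with
  | [] => ("", "")
  | h :: t =>
    let stations := (pvB_min h t).2
    let idx := sequence - 1
    if idx < 0 || (stations.length : Int) ≤ idx then ("", "")
    else
      let prev_name := if 1 ≤ idx then PySem.List.pyGetD stations (idx - 1) "" else ""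
      let next_name := if idx + 1 < (stations.length : Int) then PySem.List.pyGetD stations (idx + 1) "" else ""
      (prev_name, next_name)

-- ===== PRECONDITION & SPEC =====
def Spec_find_route_stations_py (route_name : String) (sequence : Int) (route_info_list : List (String × List String)) (out : String × String) : Prop := out = find_route_stations_py_alt route_name sequence route_info_list
instance (route_name : String) (sequence : Int) (route_info_list : List (String × List String)) (out : String × String) : Decidable (Spec_find_route_stations_py route_name sequence route_info_list out) := by unfold Spec_find_route_stations_py; infer_instance

-- ===== CLAIM (what is proved, stated in full; the proofs are below) =====
def Claim_equal_find_route_stations_py : Prop := ∀ (route_name : String) (sequence : Int) (route_info_list : List (String × List String)), Dom_find_route_stations_py route_name sequence route_info_list → Spec_find_route_stations_py route_name sequence route_info_list (find_route_stations_py route_name sequence route_info_list)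

-- ===== LEMMAS AND PROOFS =====

-- an equal string is a substring of itself ('x in x' is True in Python)
theorem pv_isIn_self (l : List Char) : PySem.Chars.isIn l l = true := by
  simp [PySem.Chars.isIn_iff_infix]

-- the min fold over a ranked tail returns an accumulator of rank 0 unchanged,
-- else the tail's first rank-0 element, else the accumulator
theorem pvB_min_char (route_name : String) (lst : List (String × List String)) (pos : Nat)
    (best : (Nat × Nat) × List String) (hb1 : best.1.1 ≤ 1) (hb2 : best.1.2 < pos) :
    pvB_min best (pvB_ranked route_name pos lst) =
      if best.1.1 = 0 then best
      else ((pvB_ranked route_name pos lst).find? (fun x => x.1.1 == 0)).getD best := by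
  induction lst generalizing pos best with
  | nil =>
    simp only [pvB_ranked, pvB_min]
    split_ifs with h
    · rfl
    · simp
  | cons p rest ih =>
    obtain ⟨n, s⟩ := p
    simp only [pvB_ranked]
    by_cases h1 : (PySem.Str.isIn route_name n || PySem.Str.isIn n route_name) = true
    · rw [if_pos h1]
      by_cases hn : n = route_name
      · rw [if_pos hn]
        simp only [pvB_min]
        by_cases hb0 : best.1.1 = 0
        · have hk : pvKeyLt (0, pos) best.1 = false := by
            simp only [pvKeyLt]; simp [hb0]; omega
          rw [hk]
          simp only [Bool.false_eq_true, if_false]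
          rw [ih (pos + 1) best hb1 (by omega)]
          simp [hb0]
        · have hk : pvKeyLt (0, pos) best.1 = true := by
            simp only [pvKeyLt]; simp; omega
          rw [hk]
          simp only [if_true]
          rw [ih (pos + 1) ((0, pos), s) (by simp) (by simp)]
          simp [hb0]
      · rw [if_neg hn]
        simp only [pvB_min]
        have hk : pvKeyLt (1, pos) best.1 = false := by
          simp only [pvKeyLt]; simp; omega
        rw [hk]
        simp only [Bool.false_eq_true, if_false]
        rw [ih (pos + 1) best hb1 (by omega)]
        by_cases hb0 : best.1.1 = 0
        · simp [hb0]
        · simp [hb0]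
    · rw [if_neg h1]
      exact ih (pos + 1) best hb1 (by omega)

-- first rank-0 element of the ranked list = first exact match found by A's loop 1
theorem pvB_find_zero (route_name : String) (lst : List (String × List String)) (pos : Nat) :
    ((pvB_ranked route_name pos lst).find? (fun x => x.1.1 == 0)).map (·.2) =
      (match pvA_loop1 route_name lst with
       | (_, s) :: _ => some s
       | [] => none) := by
  induction lst generalizing pos with
  | nil => simp [pvB_ranked, pvA_loop1]
  | cons p rest ih =>
    obtain ⟨n, s⟩ := p
    simp only [pvB_ranked, pvA_loop1]
    by_cases hn : n = route_name
    · subst hn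
      rw [if_pos (by simp [pv_isIn_self])]
      simp
    · simp only [hn, if_false]
      by_cases h1 : (PySem.Str.isIn route_name n || PySem.Str.isIn n route_name) = true
      · rw [if_pos h1]
        simp only [List.find?_cons]
        simpa using ih (pos + 1)
      · rw [if_neg h1]
        exact ih (pos + 1)

-- B's selected stations list = A's candidates[0] stations
theorem pv_select_eq (route_name : String) (lst : List (String × List String)) (pos : Nat) :
    (match pvB_ranked route_name pos lst with
     | [] => none
     | h :: t => some (pvB_min h t).2) =
      (match (if pvA_loop1 route_name lst = [] then pvA_loop2 route_name lst
              else pvA_loop1 route_name lst) with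
       | [] => none
       | (_, s) :: _ => some s) := by
  induction lst generalizing pos with
  | nil => simp [pvB_ranked, pvA_loop1, pvA_loop2]
  | cons p rest ih =>
    obtain ⟨n, s⟩ := p
    by_cases hn : n = route_name
    · subst hn
      simp only [pvB_ranked, pvA_loop1, if_true]
      rw [if_pos (by simp [pv_isIn_self])]
      show some (pvB_min ((0, pos), s) (pvB_ranked _ (pos + 1) rest)).2 = _
      rw [pvB_min_char _ rest (pos + 1) _ (by simp) (by simp)]
      simp
    · simp only [pvB_ranked, pvA_loop1, pvA_loop2, hn, if_false]
      by_cases h1 : (PySem.Str.isIn route_name n || PySem.Str.isIn n route_name) = true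
      · rw [if_pos h1, if_pos h1]
        show some (pvB_min ((1, pos), s) (pvB_ranked route_name (pos + 1) rest)).2 = _
        rw [pvB_min_char route_name rest (pos + 1) _ (by simp) (by simp)]
        simp only [Nat.one_ne_zero, if_false]
        have hz := pvB_find_zero route_name rest (pos + 1)
        cases hf : (pvB_ranked route_name (pos + 1) rest).find? (fun x => x.1.1 == 0) with
        | some z =>
          rw [hf] at hz
          cases hA : pvA_loop1 route_name rest with
          | nil => rw [hA] at hz; simp at hz
          | cons q qs =>
            obtain ⟨qn, qst⟩ := q
            rw [hA] at hz; simp at hz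
            simp [hz]
        | none =>
          rw [hf] at hz
          cases hA : pvA_loop1 route_name rest with
          | cons q qs => obtain ⟨qn, qst⟩ := q; rw [hA] at hz; simp at hz
          | nil => simp
      · rw [if_neg h1, if_neg h1]
        exact ih (pos + 1)

-- ===== VERDICT (by name: the statement is the Claim_ definition above) =====
theorem find_route_stations_py_spec : Claim_equal_find_route_stations_py := by
  intro route_name sequence lst _
  unfold Spec_find_route_stations_py find_route_stations_py find_route_stations_py_alt
  have h := pv_select_eq route_name lst 0
  cases hB : pvB_ranked route_name 0 lst with
  | nil =>
    rw [hB] at h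
    cases hc : (if pvA_loop1 route_name lst = [] then pvA_loop2 route_name lst else pvA_loop1 route_name lst) with
    | nil => simp [hc]
    | cons q qs => obtain ⟨qn, qst⟩ := q; rw [hc] at h; simp at h
  | cons hh tt =>
    rw [hB] at h
    cases hc : (if pvA_loop1 route_name lst = [] then pvA_loop2 route_name lst else pvA_loop1 route_name lst) with
    | nil => rw [hc] at h; simp at h
    | cons q qs =>
      obtain ⟨qn, qst⟩ := q
      rw [hc] at h; simp at h
      simp [hc, h]
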